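-- pv_equiv track=rewrite | github.com/ngnquanq/change_point_detection | scripts/split_hasc.py | build_label_map
-- ===== SOURCE A (Python) =====
-- def build_label_map(all_labels):
--     """Build label-to-index mapping. Pure labels first, then transitions."""
--     unique_labels = sorted(set(all_labels))
--     pure_labels = [lbl for lbl in unique_labels if "_to_" not in lbl]
--     trans_labels = [lbl for lbl in unique_labels if "_to_" in lbl]
--
--     label2idx = {}
--     idx2label = {}
--     for i, lbl in enumerate(pure_labels + trans_labels):
--         label2idx[lbl] = i
--         idx2label[i] = lbl
--
--     pure_indices = list(range(len(pure_labels)))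
--     return label2idx, idx2label, pure_indices
-- ===== SOURCE B (Python) =====
-- def _insert_unique(xs, x):
--     """Merge x into the sorted duplicate-free list xs (online insertion)."""
--     if not xs or xs[-1] < x:
--         xs.append(x)
--         return xs
--     i = 0
--     while i < len(xs) and xs[i] < x:
--         i += 1
--     if i == len(xs) or xs[i] != x:
--         xs.insert(i, x)
--     return xs
--
--
-- def build_label_map(all_labels):
--     """Build label-to-index mapping. Pure labels first, then transitions."""
--     pure, trans = [], []
--     for lbl in all_labels:
--         if "_to_" in lbl:
--             trans = _insert_unique(trans, lbl)
--         else: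
--             pure = _insert_unique(pure, lbl)
--     label2idx = {}
--     idx2label = {}
--     for i, lbl in enumerate(pure + trans):
--         label2idx[lbl] = i
--         idx2label[i] = lbl
--     return label2idx, idx2label, list(range(len(pure)))
-- ===== Notes on version B (the rewrite author's own statement) =====
-- stated objective: alternative
-- what changed: B replaces sorted(set(...)) plus two filter passes by a single online pass over all_labels that routes each label into one of two sorted duplicate-free lists via ordered-insertion with dedup (no set, no sort call); the maps are then filled from that incrementally built order.
import Mathlib
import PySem

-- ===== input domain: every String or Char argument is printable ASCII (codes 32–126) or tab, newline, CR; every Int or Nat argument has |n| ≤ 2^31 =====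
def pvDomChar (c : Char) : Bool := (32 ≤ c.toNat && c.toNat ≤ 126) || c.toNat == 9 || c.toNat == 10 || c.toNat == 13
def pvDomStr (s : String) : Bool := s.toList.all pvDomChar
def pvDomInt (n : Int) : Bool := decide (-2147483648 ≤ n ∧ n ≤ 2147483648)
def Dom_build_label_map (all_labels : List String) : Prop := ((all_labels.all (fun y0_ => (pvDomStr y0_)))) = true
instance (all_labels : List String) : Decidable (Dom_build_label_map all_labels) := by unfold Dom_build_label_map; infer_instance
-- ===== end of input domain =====

-- B replaces sort(set)+filters by one online pass inserting each label, deduplicated, into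
-- the right sorted list; proved to return exactly A's value (objective: alternative).


-- ===== PORT A =====
def build_label_map (all_labels : List String) : (List (String × Int)) × (List (Int × String)) × List Int :=
  let unique_labels := PySem.List.sorted (PySem.Set.ofList all_labels) (fun x => x)
  let pure_labels := unique_labels.filter (fun lbl => !PySem.Str.isIn "_to_" lbl)
  let trans_labels := unique_labels.filter (fun lbl => PySem.Str.isIn "_to_" lbl)
  let p := (PySem.List.enumerate (pure_labels ++ trans_labels)).foldl
      (fun (d : PySem.Dict String Int × PySem.Dict Int String) il =>
        (d.1.insert il.2 il.1, d.2.insert il.1 il.2))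
      (PySem.Dict.empty, PySem.Dict.empty)
  (p.1.items, p.2.items, PySem.List.pyRange 0 (pure_labels.length : Int) 1)

-- ===== PORT B =====
-- _insert_unique: the while loop scans the prefix of elements < x (carried as `pre`,
-- with `rest` the unscanned suffix and `xs` the untouched original for the early return)
def insertUniqueGo (x : String) (xs pre rest : List String) : List String :=
  match rest with
  | [] => pre ++ [x]
  | y :: ys =>
    if y < x then insertUniqueGo x xs (pre ++ [y]) ys
    else if y == x then xs
    else pre ++ [x] ++ (y :: ys)

def insertUnique (xs : List String) (x : String) : List String :=
  -- fast path 'if not xs or xs[-1] < x: xs.append(x)' (short-circuit 'or' as nested value)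
  if xs.isEmpty || decide (PySem.List.pyGetD xs (-1) "" < x) then xs ++ [x]
  else insertUniqueGo x xs [] xs

def build_label_map_alt (all_labels : List String) : (List (String × Int)) × (List (Int × String)) × List Int :=
  let pt := all_labels.foldl
      (fun (pt : List String × List String) lbl =>
        if PySem.Str.isIn "_to_" lbl then (pt.1, insertUnique pt.2 lbl)
        else (insertUnique pt.1 lbl, pt.2))
      ([], [])
  let p := (PySem.List.enumerate (pt.1 ++ pt.2)).foldl
      (fun (d : PySem.Dict String Int × PySem.Dict Int String) il =>
        (d.1.insert il.2 il.1, d.2.insert il.1 il.2))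
      (PySem.Dict.empty, PySem.Dict.empty)
  (p.1.items, p.2.items, PySem.List.pyRange 0 (pt.1.length : Int) 1)

-- ===== PRECONDITION & SPEC =====
def Spec_build_label_map (all_labels : List String) (out : (List (String × Int)) × (List (Int × String)) × List Int) : Prop := out = build_label_map_alt all_labels
instance (all_labels : List String) (out : (List (String × Int)) × (List (Int × String)) × List Int) : Decidable (Spec_build_label_map all_labels out) := by unfold Spec_build_label_map; infer_instance

-- ===== CLAIM (what is proved, stated in full; the proofs are below) =====
def Claim_equal_build_label_map : Prop := ∀ (all_labels : List String), Dom_build_label_map all_labels → Spec_build_label_map all_labels (build_label_map all_labels)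

-- ===== LEMMAS AND PROOFS =====

-- clean recursive form of _insert_unique, used only by the proofs
def insRec : List String → String → List String
  | [], x => [x]
  | y :: ys, x => if y < x then y :: insRec ys x else if y == x then y :: ys else x :: y :: ys

theorem insertUniqueGo_eq (x : String) (xs pre rest : List String)
    (h : xs = pre ++ rest) : insertUniqueGo x xs pre rest = pre ++ insRec rest x := by
  induction rest generalizing pre with
  | nil => simp [insertUniqueGo, insRec]
  | cons y ys ih =>
    simp only [insertUniqueGo, insRec]
    by_cases h1 : y < x
    · simp only [if_pos h1]
      rw [ih (pre ++ [y]) (by simpa using h)]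
      simp
    · by_cases h2 : y = x
      · simp [h2, h]
      · simp [h1, h2]

theorem le_getLast_of_pairwise (xs : List String) (y : String)
    (h : xs.Pairwise (· < ·)) (hne : xs ≠ []) (hy : y ∈ xs) : y ≤ xs.getLast hne := by
  induction xs with
  | nil => exact absurd rfl hne
  | cons z zs ih =>
    rw [List.pairwise_cons] at h
    rcases List.mem_cons.mp hy with rfl | hy'
    · rcases List.eq_nil_or_concat zs with rfl | ⟨l, c, rfl⟩
      · simp
      · simp only [List.concat_eq_append] at h ⊢
        rw [List.getLast_cons (by simp), List.getLast_concat]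
        exact le_of_lt (h.1 c (by simp))
    · have hzs : zs ≠ [] := by rintro rfl; simp at hy'
      rw [List.getLast_cons hzs]
      exact ih h.2 hzs hy'

theorem insRec_of_forall_lt (xs : List String) (x : String)
    (h : ∀ y ∈ xs, y < x) : insRec xs x = xs ++ [x] := by
  induction xs with
  | nil => simp [insRec]
  | cons y ys ih =>
    simp only [insRec, if_pos (h y (by simp)), List.cons_append]
    rw [ih (fun a ha => h a (by simp [ha]))]

theorem insertUnique_eq (xs : List String) (x : String)
    (h : xs.Pairwise (· < ·)) : insertUnique xs x = insRec xs x := by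
  rcases eq_or_ne xs [] with rfl | hne
  · simp [insertUnique, insRec]
  · unfold insertUnique
    rw [PySem.List.pyGetD_neg_one xs "" hne]
    by_cases hl : xs.getLast hne < x
    · rw [if_pos (by simp [hl]),
        insRec_of_forall_lt xs x
          (fun y hy => lt_of_le_of_lt (le_getLast_of_pairwise xs y h hne hy) hl)]
    · rw [if_neg (by simp [hl, hne]), insertUniqueGo_eq x xs [] xs rfl, List.nil_append]

theorem mem_insRec (a x : String) (l : List String) :
    a ∈ insRec l x ↔ a = x ∨ a ∈ l := by
  induction l with
  | nil => simp [insRec]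
  | cons y ys ih =>
    simp only [insRec]
    split_ifs with h1 h2
    · rw [List.mem_cons, ih, List.mem_cons]
      tauto
    · have hyx : y = x := by simpa using h2
      subst hyx
      rw [List.mem_cons]
      tauto
    · rw [List.mem_cons]

theorem pairwise_insRec (x : String) (l : List String)
    (h : l.Pairwise (· < ·)) : (insRec l x).Pairwise (· < ·) := by
  induction l with
  | nil => simp [insRec]
  | cons y ys ih =>
    rw [List.pairwise_cons] at h
    simp only [insRec]
    split_ifs with h1 h2
    · refine List.pairwise_cons.mpr ⟨?_, ih h.2⟩
      intro a ha
      rcases (mem_insRec a x ys).mp ha with rfl | ha'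
      · exact h1
      · exact h.1 a ha'
    · exact List.pairwise_cons.mpr h
    · have hyx : x < y := by
        rcases lt_trichotomy x y with h' | h' | h'
        · exact h'
        · exact absurd (beq_iff_eq.mpr h'.symm) (by simpa using h2)
        · exact absurd h' h1
      refine List.pairwise_cons.mpr ⟨?_, List.pairwise_cons.mpr h⟩
      intro a ha
      rcases List.mem_cons.mp ha with rfl | ha'
      · exact hyx
      · exact lt_trans hyx (h.1 a ha')

theorem foldl_insertUnique_props (ys acc : List String)
    (h : acc.Pairwise (· < ·)) :
    (ys.foldl insertUnique acc).Pairwise (· < ·) ∧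
      ∀ a, a ∈ ys.foldl insertUnique acc ↔ a ∈ acc ∨ a ∈ ys := by
  induction ys generalizing acc with
  | nil => exact ⟨h, by simp⟩
  | cons y t ih =>
    simp only [List.foldl_cons, insertUnique_eq acc y h]
    obtain ⟨hp, hm⟩ := ih (insRec acc y) (pairwise_insRec y acc h)
    refine ⟨hp, fun a => ?_⟩
    rw [hm a, mem_insRec, List.mem_cons]
    tauto

-- the routing fold splits into two independent insertion folds over the two filters
theorem route_split (c : String → Bool) (ls : List String) (p t : List String) :
    ls.foldl (fun (pt : List String × List String) lbl =>
        if c lbl then (pt.1, insertUnique pt.2 lbl) else (insertUnique pt.1 lbl, pt.2)) (p, t)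
      = (((ls.filter (fun l => !c l)).foldl insertUnique p),
         ((ls.filter c).foldl insertUnique t)) := by
  induction ls generalizing p t with
  | nil => simp
  | cons y ys ih =>
    by_cases h : c y <;> simp [h, ih]

-- the insertion fold over a filter of the input IS the filter of sorted(set(input))
theorem foldl_insertUnique_filter (p : String → Bool) (ls : List String) :
    (ls.filter p).foldl insertUnique []
      = (PySem.List.sorted (PySem.Set.ofList ls) (fun x => x)).filter p := by
  set F := (ls.filter p).foldl insertUnique [] with hF
  set L := PySem.List.sorted (PySem.Set.ofList ls) (fun x => x) with hL
  have hFp : F.Pairwise (· < ·) := (foldl_insertUnique_props _ [] (by simp)).1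
  have hLp : (L.filter p).Pairwise (· < ·) :=
    List.Pairwise.sublist List.filter_sublist (PySem.List.sorted_ofList_pairwise_lt ls)
  have hmem : ∀ a, a ∈ F ↔ a ∈ L.filter p := by
    intro a
    rw [hF, (foldl_insertUnique_props _ [] (by simp)).2 a]
    simp [hL, List.mem_filter, PySem.List.mem_sorted, PySem.Set.mem_ofList, and_comm]
  have hperm : F.Perm (L.filter p) := by
    apply (List.perm_ext_iff_of_nodup ?_ ?_).mpr hmem
    · exact hFp.imp (fun h => ne_of_lt h)
    · exact hLp.imp (fun h => ne_of_lt h)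
  calc F = PySem.List.sorted F (fun x => x) :=
        (PySem.List.sorted_eq_self_of_pairwise _ _ (hFp.imp le_of_lt)).symm
    _ = PySem.List.sorted (L.filter p) (fun x => x) :=
        PySem.List.sorted_eq_sorted_of_perm _ _ _ (fun _ _ h => h) hperm
    _ = L.filter p := PySem.List.sorted_eq_self_of_pairwise _ _ (hLp.imp le_of_lt)

-- ===== VERDICT (by name: the statement is the Claim_ definition above) =====
theorem build_label_map_spec : Claim_equal_build_label_map := by
  intro all_labels _
  unfold Spec_build_label_map build_label_map build_label_map_alt
  rw [route_split, foldl_insertUnique_filter, foldl_insertUnique_filter]
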